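-- pv_equiv track=rewrite | github.com/hansungk/cyclotron | scripts/smem_parity.py | override_sim_timeout
-- ===== SOURCE A (Python) =====
-- def override_sim_timeout(base_text: str, timeout_cycles: int) -> str:
--     lines = base_text.splitlines()
--     out: list[str] = []
--     in_sim = False
--     replaced = False
--
--     for line in lines:
--         stripped = line.strip()
--         if stripped.startswith("[") and stripped.endswith("]"):
--             in_sim = stripped == "[sim]"
--             out.append(line)
--             continue
--         if in_sim and stripped.startswith("timeout"):
--             out.append(f"timeout = {timeout_cycles}")
--             replaced = True
--             continue
--         out.append(line)
--
--     if not replaced: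
--         rebuilt: list[str] = []
--         inserted = False
--         in_sim = False
--         for line in out:
--             stripped = line.strip()
--             if stripped == "[sim]":
--                 in_sim = True
--                 rebuilt.append(line)
--                 continue
--             if in_sim and stripped.startswith("[") and stripped.endswith("]") and not inserted:
--                 rebuilt.append(f"timeout = {timeout_cycles}")
--                 inserted = True
--                 in_sim = False
--             rebuilt.append(line)
--         if in_sim and not inserted:
--             rebuilt.append(f"timeout = {timeout_cycles}")
--         out = rebuilt
--
--     return "\n".join(out) + ("\n" if base_text.endswith("\n") else "")
-- ===== SOURCE B (Python) =====
-- def override_sim_timeout(base_text: str, timeout_cycles: int) -> str: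
--     lines = base_text.splitlines()
--     new_line = f"timeout = {timeout_cycles}"
--
--     # Detection pass: is there a 'timeout' line inside any [sim] section?
--     in_sim = False
--     has_timeout = False
--     for line in lines:
--         s = line.strip()
--         if s.startswith("[") and s.endswith("]"):
--             in_sim = s == "[sim]"
--         elif in_sim and s.startswith("timeout"):
--             has_timeout = True
--
--     out: list[str] = []
--     if has_timeout:
--         # Replace every in-sim timeout line.
--         in_sim = False
--         for line in lines:
--             s = line.strip()
--             if s.startswith("[") and s.endswith("]"):
--                 in_sim = s == "[sim]"
--                 out.append(line)
--             elif in_sim and s.startswith("timeout"):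
--                 out.append(new_line)
--             else:
--                 out.append(line)
--     else:
--         # Insert into the first [sim] region, just before its terminating header
--         # (consecutive [sim] headers continue the region), or at EOF.
--         state = 0  # 0 = before first [sim], 1 = inside it, 2 = inserted/done
--         for line in lines:
--             s = line.strip()
--             if state == 1 and s.startswith("[") and s.endswith("]") and s != "[sim]":
--                 out.append(new_line)
--                 state = 2
--             if state == 0 and s == "[sim]":
--                 state = 1
--             out.append(line)
--         if state == 1:
--             out.append(new_line)
--
--     return "\n".join(out) + ("\n" if base_text.endswith("\n") else "")
-- ===== Notes on version B (the rewrite author's own statement) =====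
-- stated objective: alternative
-- what changed: A eagerly replaces while walking and then, if nothing was replaced, re-walks its own output to insert; B first does a pure detection pass to decide replace-vs-insert, then a single build pass (replace everywhere, or a 3-state insert machine for the first [sim] region).
import Mathlib
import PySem

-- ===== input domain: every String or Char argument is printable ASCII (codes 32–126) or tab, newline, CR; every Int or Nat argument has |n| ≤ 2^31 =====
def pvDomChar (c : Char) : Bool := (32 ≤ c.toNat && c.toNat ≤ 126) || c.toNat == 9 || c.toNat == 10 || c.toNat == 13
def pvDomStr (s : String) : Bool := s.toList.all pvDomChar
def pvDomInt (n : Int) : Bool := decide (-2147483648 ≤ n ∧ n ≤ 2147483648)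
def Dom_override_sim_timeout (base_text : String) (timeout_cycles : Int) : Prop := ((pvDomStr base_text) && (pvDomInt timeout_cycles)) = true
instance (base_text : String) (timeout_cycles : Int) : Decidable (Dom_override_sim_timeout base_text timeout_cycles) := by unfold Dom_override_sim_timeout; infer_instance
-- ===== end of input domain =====

-- B makes one global detection pass to decide replace-vs-insert, then a single build pass
-- (replace everywhere, or a 3-state insert machine for the first [sim] region): same return
-- value as A, different decomposition (objective: alternative).

-- ===== PORT A =====
-- first for-loop of A: state (out, in_sim, replaced)
def ovA_pass1 (tc : Int) : List String → List String → Bool → Bool → List String × Bool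
  | [], out, _inSim, replaced => (out, replaced)
  | l :: rest, out, inSim, replaced =>
    let s := PySem.Str.strip l
    if PySem.Str.startswith s "[" && PySem.Str.endswith s "]" then
      ovA_pass1 tc rest (out ++ [l]) (s == "[sim]") replaced
    else if inSim && PySem.Str.startswith s "timeout" then
      ovA_pass1 tc rest (out ++ ["timeout = " ++ PySem.Int.toStr tc]) inSim true
    else
      ovA_pass1 tc rest (out ++ [l]) inSim replaced

-- second for-loop of A (plus its trailing 'if in_sim and not inserted' append): state (rebuilt, inserted, in_sim)
def ovA_pass2 (tc : Int) : List String → List String → Bool → Bool → List String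
  | [], rebuilt, inserted, inSim =>
    if inSim && !inserted then rebuilt ++ ["timeout = " ++ PySem.Int.toStr tc] else rebuilt
  | l :: rest, rebuilt, inserted, inSim =>
    let s := PySem.Str.strip l
    if s == "[sim]" then
      ovA_pass2 tc rest (rebuilt ++ [l]) inserted true
    else if inSim && (PySem.Str.startswith s "[" && PySem.Str.endswith s "]") && !inserted then
      ovA_pass2 tc rest (rebuilt ++ ["timeout = " ++ PySem.Int.toStr tc, l]) true false
    else
      ovA_pass2 tc rest (rebuilt ++ [l]) inserted inSim

def override_sim_timeout (base_text : String) (timeout_cycles : Int) : String :=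
  let lines := PySem.Str.splitlines base_text
  let p : List String × Bool := ovA_pass1 timeout_cycles lines [] false false
  let out := if !p.2 then ovA_pass2 timeout_cycles p.1 [] false false else p.1
  PySem.Str.join "\n" out ++ (if PySem.Str.endswith base_text "\n" then "\n" else "")

-- ===== PORT B =====
-- detection pass: does any [sim] section contain a 'timeout' line?  state (in_sim, has_timeout)
def ovB_detect : List String → Bool → Bool → Bool
  | [], _inSim, has => has
  | l :: rest, inSim, has =>
    let s := PySem.Str.strip l
    if PySem.Str.startswith s "[" && PySem.Str.endswith s "]" then
      ovB_detect rest (s == "[sim]") has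
    else if inSim && PySem.Str.startswith s "timeout" then
      ovB_detect rest inSim true
    else
      ovB_detect rest inSim has

-- build pass, replace mode
def ovB_replace (tc : Int) : List String → List String → Bool → List String
  | [], out, _inSim => out
  | l :: rest, out, inSim =>
    let s := PySem.Str.strip l
    if PySem.Str.startswith s "[" && PySem.Str.endswith s "]" then
      ovB_replace tc rest (out ++ [l]) (s == "[sim]")
    else if inSim && PySem.Str.startswith s "timeout" then
      ovB_replace tc rest (out ++ ["timeout = " ++ PySem.Int.toStr tc]) inSim
    else
      ovB_replace tc rest (out ++ [l]) inSim

-- build pass, insert mode: st = 0 (before first [sim]) / 1 (inside it) / 2 (inserted / done)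
def ovB_insert (tc : Int) : List String → List String → Nat → List String
  | [], out, st => if st == 1 then out ++ ["timeout = " ++ PySem.Int.toStr tc] else out
  | l :: rest, out, st =>
    let s := PySem.Str.strip l
    let q : List String × Nat :=
      if st == 1 && (PySem.Str.startswith s "[" && PySem.Str.endswith s "]") && !(s == "[sim]") then
        (out ++ ["timeout = " ++ PySem.Int.toStr tc], 2)
      else (out, st)
    let st' := if q.2 == 0 && s == "[sim]" then 1 else q.2
    ovB_insert tc rest (q.1 ++ [l]) st'

def override_sim_timeout_alt (base_text : String) (timeout_cycles : Int) : String :=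
  let lines := PySem.Str.splitlines base_text
  let out :=
    if ovB_detect lines false false then ovB_replace timeout_cycles lines [] false
    else ovB_insert timeout_cycles lines [] 0
  PySem.Str.join "\n" out ++ (if PySem.Str.endswith base_text "\n" then "\n" else "")

-- ===== PRECONDITION & SPEC =====
def Spec_override_sim_timeout (base_text : String) (timeout_cycles : Int) (out : String) : Prop := out = override_sim_timeout_alt base_text timeout_cycles
instance (base_text : String) (timeout_cycles : Int) (out : String) : Decidable (Spec_override_sim_timeout base_text timeout_cycles out) := by unfold Spec_override_sim_timeout; infer_instance

-- ===== CLAIM (what is proved, stated in full; the proofs are below) =====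
def Claim_equal_override_sim_timeout : Prop := ∀ (base_text : String) (timeout_cycles : Int), Dom_override_sim_timeout base_text timeout_cycles → Spec_override_sim_timeout base_text timeout_cycles (override_sim_timeout base_text timeout_cycles)

-- ===== LEMMAS AND PROOFS =====

-- A's first pass computes exactly (B's replace build, B's detection flag)
theorem pass1_eq (tc : Int) : ∀ (lines out : List String) (inSim rep : Bool),
    ovA_pass1 tc lines out inSim rep = (ovB_replace tc lines out inSim, ovB_detect lines inSim rep) := by
  intro lines
  induction lines with
  | nil => intro out inSim rep; simp [ovA_pass1, ovB_replace, ovB_detect]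
  | cons l rest ih =>
    intro out inSim rep
    simp only [ovA_pass1, ovB_replace, ovB_detect]
    split_ifs <;> apply ih

-- the detection flag never resets
theorem detect_true : ∀ (lines : List String) (inSim : Bool), ovB_detect lines inSim true = true := by
  intro lines
  induction lines with
  | nil => intro inSim; simp [ovB_detect]
  | cons l rest ih => intro inSim; simp only [ovB_detect]; split_ifs <;> apply ih

-- when nothing is detected, the replace build is the identity
theorem replace_id (tc : Int) : ∀ (lines out : List String) (inSim : Bool),
    ovB_detect lines inSim false = false → ovB_replace tc lines out inSim = out ++ lines := by
  intro lines
  induction lines with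
  | nil => intro out inSim _; simp [ovB_replace]
  | cons l rest ih =>
    intro out inSim h
    simp only [ovB_detect] at h
    simp only [ovB_replace]
    split_ifs at h ⊢ with h1 h2
    · rw [ih _ _ h]; simp
    · rw [detect_true] at h; exact absurd h (by simp)
    · rw [ih _ _ h]; simp

-- A's second pass agrees with B's 3-state insert machine under the state correspondence
-- (inserted, in_sim) : (false,false) ~ 0, (false,true) ~ 1, (true,_) ~ 2
theorem pass2_eq (tc : Int) : ∀ (lines out : List String),
    (ovA_pass2 tc lines out false false = ovB_insert tc lines out 0) ∧
    (ovA_pass2 tc lines out false true = ovB_insert tc lines out 1) ∧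
    (∀ sim : Bool, ovA_pass2 tc lines out true sim = ovB_insert tc lines out 2) := by
  intro lines
  induction lines with
  | nil => intro out; simp [ovA_pass2, ovB_insert]
  | cons l rest ih =>
    intro out
    refine ⟨?_, ?_, ?_⟩
    · -- state 0
      simp only [ovA_pass2, ovB_insert]
      by_cases hs : PySem.Str.strip l == "[sim]"
      · simp only [hs]
        simp only [Bool.false_and]
        simp
        exact (ih _).2.1
      · simp [hs]
        exact (ih _).1
    · -- state 1
      simp only [ovA_pass2, ovB_insert]
      by_cases hs : PySem.Str.strip l == "[sim]"
      · simp [hs]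
        exact (ih _).2.1
      · by_cases hh : PySem.Chars.startswith (PySem.Chars.strip l.toList) ['['] = true ∧ PySem.Chars.endswith (PySem.Chars.strip l.toList) [']'] = true
        · simp [hs, hh]
          have := ((ih (out ++ ["timeout = " ++ PySem.Int.toStr tc, l])).2.2 false)
          simpa using this
        · simp [hs, hh]
          exact (ih _).2.1
    · -- state 2
      intro sim
      simp only [ovA_pass2, ovB_insert]
      by_cases hs : PySem.Str.strip l == "[sim]"
      · simp [hs]
        exact (ih _).2.2 true
      · by_cases hh : PySem.Chars.startswith (PySem.Chars.strip l.toList) ['['] = true ∧ PySem.Chars.endswith (PySem.Chars.strip l.toList) [']'] = true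
        · simp [hs, hh]
          exact (ih _).2.2 sim
        · simp [hs]
          exact (ih _).2.2 sim

-- ===== VERDICT (by name: the statement is the Claim_ definition above) =====
theorem override_sim_timeout_spec : Claim_equal_override_sim_timeout := by
  intro base_text tc _
  unfold Spec_override_sim_timeout override_sim_timeout override_sim_timeout_alt
  simp only [pass1_eq]
  cases h : ovB_detect (PySem.Str.splitlines base_text) false false with
  | true => simp
  | false =>
    simp only [Bool.not_false, if_true, Bool.false_eq_true, if_false]
    rw [replace_id _ _ _ _ h]
    simp only [List.nil_append]
    rw [(pass2_eq tc (PySem.Str.splitlines base_text) []).1]
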